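-- pv_equiv track=rewrite | github.com/Pascalinette/gpu_playground | misc/sm_instruction_finder/__init__.py | get_instruction_argument_type
-- ===== SOURCE A (Python) =====
-- def get_instruction_argument_type(raw_part: str) -> str:
--     data_type = "unknown"
--     start_index = 0
--
--     if raw_part[0] == "-":
--         start_index = 1
--
--     if raw_part[start_index] == "R":
--         if raw_part.find("+") != -1:
--             data_type = "register_with_immediate_integer"
--         else:
--             data_type = "register"
--     if raw_part[0] == "P":
--         data_type = "predicate_register"
--     elif raw_part[start_index : start_index + 2] == "0x":
--         data_type = "immediate_integer"
--     elif raw_part[start_index : start_index + 2] == "c[":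
--         data_type = "const_memory_addr"
--     elif raw_part[start_index : start_index + 2] == "a[":
--         data_type = "attribute"
--     elif raw_part[start_index] == "[" and raw_part[-1] == "]":
--         sub_part = get_instruction_argument_type(raw_part[start_index + 1 : -1])
--
--         if sub_part != "unknown":
--             data_type = "memory_address_from_" + sub_part
--     elif raw_part[start_index] == "|" and raw_part[-1] == "|":
--         sub_part = get_instruction_argument_type(raw_part[start_index + 1 : -1])
--
--         if sub_part != "unknown":
--             data_type = "absolute_value_from_" + sub_part
--     # TODO: do something about .NEG syntax???
--     else:
--         # Attempt parsing as integer
--         try: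
--             int(raw_part)
--
--             data_type = "immediate_integer"
--         except ValueError:
--             # if not valid, attempt parsing as float
--             try:
--                 float(raw_part)
--
--                 data_type = "immediate_float"
--             except ValueError:
--                 pass
--
--     return data_type
-- ===== SOURCE B (Python) =====
-- def _classify_core(s: str) -> str:
--     t = s[1:] if s.startswith("-") else s
--     if t.startswith("R"):
--         return "register_with_immediate_integer" if "+" in s else "register"
--     if s.startswith("P"):
--         return "predicate_register"
--     if t.startswith("0x"):
--         return "immediate_integer"
--     if t.startswith("c["):
--         return "const_memory_addr"
--     if t.startswith("a["):
--         return "attribute"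
--     try:
--         int(s)
--         return "immediate_integer"
--     except ValueError:
--         try:
--             float(s)
--             return "immediate_float"
--         except ValueError:
--             return "unknown"
--
--
-- def get_instruction_argument_type(raw_part: str) -> str:
--     prefix = ""
--     s = raw_part
--     while True:
--         t = s[1:] if s.startswith("-") else s
--         if t.startswith("[") and s.endswith("]"):
--             prefix += "memory_address_from_"
--             s = t[1:-1]
--         elif t.startswith("|") and s.endswith("|"):
--             prefix += "absolute_value_from_"
--             s = t[1:-1]
--         else:
--             break
--     core = _classify_core(s)
--     return "unknown" if core == "unknown" else prefix + core
-- ===== Notes on version B (the rewrite author's own statement) =====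
-- stated objective: alternative
-- what changed: A classifies by self-recursion that prepends a wrapper label at every nesting level; B is iterative: one loop peels the nested [..]/|..| wrappers (re-stripping a '-' sign each level) into a prefix accumulator, then classifies the remaining core exactly once and returns prefix+core (or 'unknown', discarding the prefix).
-- outside the precondition, e.g. on get_instruction_argument_type(''): A raises IndexError, B returns 'unknown'; on get_instruction_argument_type('-'): A raises IndexError, B returns 'unknown'; on get_instruction_argument_type('[]'): A raises IndexError, B returns 'unknown'
-- crash fix: On inputs whose core at some nesting level is empty or a bare '-' (e.g. '', '-', '[]', '[-]'), A raises IndexError while B returns 'unknown'. — e.g. on get_instruction_argument_type("[]"): A raises IndexError, B returns "unknown"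
import Mathlib
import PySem

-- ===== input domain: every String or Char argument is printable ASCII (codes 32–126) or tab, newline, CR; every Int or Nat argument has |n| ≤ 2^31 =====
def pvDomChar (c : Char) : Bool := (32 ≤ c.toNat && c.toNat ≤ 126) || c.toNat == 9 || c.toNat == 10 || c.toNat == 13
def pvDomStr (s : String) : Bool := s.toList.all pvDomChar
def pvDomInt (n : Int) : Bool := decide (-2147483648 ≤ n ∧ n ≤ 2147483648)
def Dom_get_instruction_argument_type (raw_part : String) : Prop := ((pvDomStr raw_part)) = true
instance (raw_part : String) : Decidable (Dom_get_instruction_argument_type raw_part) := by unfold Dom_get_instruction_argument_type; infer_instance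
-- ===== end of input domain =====

-- B replaces A's self-recursion by one explicit loop that peels nested [..]/|..| wrappers into a
-- prefix accumulator and classifies the remaining core once (objective: alternative decomposition,
-- same cost; equivalence of the RETURN value is proved on Pre_, where A returns at all).

-- shared string-label constants (both Pythons return these literals)
def pvUNK  : List Char := "unknown".toList
def pvRWI  : List Char := "register_with_immediate_integer".toList
def pvREG  : List Char := "register".toList
def pvPRED : List Char := "predicate_register".toList
def pvIMMI : List Char := "immediate_integer".toList
def pvCMA  : List Char := "const_memory_addr".toList
def pvATTR : List Char := "attribute".toList
def pvIMMF : List Char := "immediate_float".toList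
def pvMAF  : List Char := "memory_address_from_".toList
def pvAVF  : List Char := "absolute_value_from_".toList

-- hand-port of Python float(s) VALIDITY (ValueError or not), shared by both ports (PySem has no float);
-- exact on the ASCII domain: strip Py_ISSPACE whitespace (same set as int()'s PySem.Int.isIntSpace),
-- optional sign, then inf/infinity/nan (case-insensitive) or digit-mantissa/exponent with PEP-515
-- underscores (single, between digits only).  Fuzzed against CPython float().
def pvExpCont : List Char → Bool
  | [] => true
  | ['_'] => false
  | '_' :: c :: r => c.isDigit && pvExpCont r
  | c :: r => c.isDigit && pvExpCont r
def pvExpStart : List Char → Bool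
  | [] => false
  | c :: r => c.isDigit && pvExpCont r
def pvExpSign : List Char → Bool
  | '+' :: r => pvExpStart r
  | '-' :: r => pvExpStart r
  | l => pvExpStart l
def pvFracCont : List Char → Bool
  | [] => true
  | ['_'] => false
  | '_' :: c :: r => c.isDigit && pvFracCont r
  | 'e' :: r => pvExpSign r
  | 'E' :: r => pvExpSign r
  | c :: r => c.isDigit && pvFracCont r
def pvFracStart : List Char → Bool
  | [] => false
  | c :: r => c.isDigit && pvFracCont r
def pvFracOpt : List Char → Bool
  | [] => true
  | 'e' :: r => pvExpSign r
  | 'E' :: r => pvExpSign r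
  | c :: r => c.isDigit && pvFracCont r
def pvIntCont : List Char → Bool
  | [] => true
  | '.' :: r => pvFracOpt r
  | ['_'] => false
  | '_' :: c :: r => c.isDigit && pvIntCont r
  | 'e' :: r => pvExpSign r
  | 'E' :: r => pvExpSign r
  | c :: r => c.isDigit && pvIntCont r
def pvMant : List Char → Bool
  | [] => false
  | '.' :: r => pvFracStart r
  | c :: r => c.isDigit && pvIntCont r
def pyFloatOk (l : List Char) : Bool :=
  let s := (List.dropWhile PySem.Int.isIntSpace (List.dropWhile PySem.Int.isIntSpace l).reverse).reverse
  let s2 := match s with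
    | '+' :: r => r
    | '-' :: r => r
    | _ => s
  let low := s2.map PySem.Chars.lowerChar
  (low == "inf".toList || low == "infinity".toList || low == "nan".toList) || pvMant s2

-- ===== PORT A =====  (transliteration of Source A on List Char; indexing via pyGetD under Pre_)
def pvStart (cs : List Char) : Nat :=
  if PySem.List.pyGetD cs 0 ' ' = '-' then 1 else 0

def pvDT1 (cs : List Char) : List Char :=
  if PySem.List.pyGetD cs (pvStart cs : Int) ' ' = 'R' then
    (if PySem.Chars.find cs ['+'] ≠ -1 then pvRWI else pvREG)
  else pvUNK

def getA (cs : List Char) : List Char :=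
  if PySem.List.pyGetD cs 0 ' ' = 'P' then pvPRED
  else if PySem.List.slice cs (some (pvStart cs : Int)) (some ((pvStart cs : Int)+2)) = '0'::'x'::[] then pvIMMI
  else if PySem.List.slice cs (some (pvStart cs : Int)) (some ((pvStart cs : Int)+2)) = 'c'::'['::[] then pvCMA
  else if PySem.List.slice cs (some (pvStart cs : Int)) (some ((pvStart cs : Int)+2)) = 'a'::'['::[] then pvATTR
  else if h1 : PySem.List.pyGetD cs (pvStart cs : Int) ' ' = '[' ∧ PySem.List.pyGetD cs (-1) ' ' = ']' then
    let sub := getA (PySem.List.slice cs (some ((pvStart cs : Int)+1)) (some (-1)))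
    if sub ≠ pvUNK then pvMAF ++ sub else pvDT1 cs
  else if h2 : PySem.List.pyGetD cs (pvStart cs : Int) ' ' = '|' ∧ PySem.List.pyGetD cs (-1) ' ' = '|' then
    let sub := getA (PySem.List.slice cs (some ((pvStart cs : Int)+1)) (some (-1)))
    if sub ≠ pvUNK then pvAVF ++ sub else pvDT1 cs
  else if (PySem.Int.ofChars? cs).isSome then pvIMMI
  else if pyFloatOk cs then pvIMMF
  else pvDT1 cs
termination_by cs.length
decreasing_by
  · have hne : cs ≠ [] := by
      intro h; subst h; simp [PySem.List.pyGetD, PySem.List.pyGet?] at h1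
    have hlen : 0 < cs.length := List.length_pos_iff.mpr hne
    have := PySem.List.length_slice cs ((pvStart cs : Int)+1) (-1)
    simp only [this, PySem.List.clampIdx_neg_one]
    have h2 : PySem.List.clampIdx cs.length ((pvStart cs : Int)+1) ≤ cs.length := PySem.List.clampIdx_le _ _
    omega
  · have hne : cs ≠ [] := by
      intro h; subst h; simp [PySem.List.pyGetD, PySem.List.pyGet?] at h2
    have hlen : 0 < cs.length := List.length_pos_iff.mpr hne
    have := PySem.List.length_slice cs ((pvStart cs : Int)+1) (-1)
    simp only [this, PySem.List.clampIdx_neg_one]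
    have h3 : PySem.List.clampIdx cs.length ((pvStart cs : Int)+1) ≤ cs.length := PySem.List.clampIdx_le _ _
    omega

def get_instruction_argument_type (raw_part : String) : String :=
  String.ofList (getA raw_part.toList)

-- ===== PORT B =====  (transliteration of Source B: peel wrappers in a loop, then classify the core once)
def pvTB (cs : List Char) : List Char :=
  if PySem.Chars.startswith cs ['-'] then PySem.List.slice cs (some 1) none else cs

def coreB (cs : List Char) : List Char :=
  if PySem.Chars.startswith (pvTB cs) ['R'] then
    (if PySem.Chars.isIn ['+'] cs then pvRWI else pvREG)
  else if PySem.Chars.startswith cs ['P'] then pvPRED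
  else if PySem.Chars.startswith (pvTB cs) ('0'::'x'::[]) then pvIMMI
  else if PySem.Chars.startswith (pvTB cs) ('c'::'['::[]) then pvCMA
  else if PySem.Chars.startswith (pvTB cs) ('a'::'['::[]) then pvATTR
  else if (PySem.Int.ofChars? cs).isSome then pvIMMI
  else if pyFloatOk cs then pvIMMF
  else pvUNK

-- termination helper for loopB (cited by name in decreasing_by)
theorem pv_loopB_dec (cs : List Char)
    (h : PySem.Chars.startswith (pvTB cs) ['['] = true ∨ PySem.Chars.startswith (pvTB cs) ['|'] = true) :
    (PySem.List.slice (pvTB cs) (some 1) (some (-1))).length < cs.length := by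
  have ht : pvTB cs ≠ [] := by
    intro hn
    rcases h with h | h <;> rw [hn] at h <;> simp [PySem.Chars.startswith, List.isPrefixOf] at h
  have h1 : (pvTB cs).length ≤ cs.length := by
    unfold pvTB
    split
    · simp [PySem.List.slice, PySem.List.clampIdx]
    · exact le_refl _
  have h2 : cs.length ≠ 0 := by
    intro hz
    have : cs = [] := List.length_eq_zero_iff.mp hz
    subst this
    simp [pvTB, PySem.List.slice] at ht
  have hl := PySem.List.length_slice (pvTB cs) 1 (-1)
  have h3 : PySem.List.clampIdx (pvTB cs).length 1 ≤ (pvTB cs).length := PySem.List.clampIdx_le _ _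
  have h4 : (pvTB cs).length ≠ 0 := by
    intro hz; exact ht (List.length_eq_zero_iff.mp hz)
  rw [hl, PySem.List.clampIdx_neg_one]
  omega

def loopB (cs acc : List Char) : List Char :=
  if h1 : PySem.Chars.startswith (pvTB cs) ['['] = true ∧ PySem.Chars.endswith cs [']'] = true then
    loopB (PySem.List.slice (pvTB cs) (some 1) (some (-1))) (acc ++ pvMAF)
  else if h2 : PySem.Chars.startswith (pvTB cs) ['|'] = true ∧ PySem.Chars.endswith cs ['|'] = true then
    loopB (PySem.List.slice (pvTB cs) (some 1) (some (-1))) (acc ++ pvAVF)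
  else
    if coreB cs = pvUNK then pvUNK else acc ++ coreB cs
termination_by cs.length
decreasing_by
  · exact pv_loopB_dec cs (Or.inl h1.1)
  · exact pv_loopB_dec cs (Or.inr h2.1)

def get_instruction_argument_type_alt (raw_part : String) : String :=
  String.ofList (loopB raw_part.toList [])

-- ===== PRECONDITION & SPEC =====
-- A raises IndexError exactly when, after repeatedly peeling matched [..] / |..| wrappers
-- (with an optional '-' sign at each level), some level is "" or "-"; the raising condition is
-- inherently recursive in the nesting depth, so Pre_ is the shape-recursive predicate below:
-- it reads only sign/bracket shape and classifies nothing.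
-- depth-bounded form (each peeled level is ≥ 2 chars shorter, so depth cs.length always
-- suffices and the 'false' fuel row is unreachable); structural, so 'decide' evaluates it
def preBF : Nat → List Char → Bool
  | _, [] => false
  | _, ['-'] => false
  | 0, _ => false
  | n+1, '-' :: th :: tt =>
      if (th = '[' && ('-' :: th :: tt).getLast? == some ']')
         || (th = '|' && ('-' :: th :: tt).getLast? == some '|') then preBF n tt.dropLast
      else true
  | n+1, c :: rest =>
      if (c = '[' && (c :: rest).getLast? == some ']')
         || (c = '|' && (c :: rest).getLast? == some '|') then preBF n rest.dropLast
      else true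

def preB (cs : List Char) : Bool := preBF cs.length cs

def Pre_get_instruction_argument_type (raw_part : String) : Prop := preB raw_part.toList = true
instance (raw_part : String) : Decidable (Pre_get_instruction_argument_type raw_part) := by
  unfold Pre_get_instruction_argument_type; infer_instance
def pvWitness_get_instruction_argument_type : String := "[-R0]"

-- On inputs with an empty (or bare "-") core at some nesting level — e.g. "", "-", "[]", "[-]" —
-- A raises IndexError while B returns "unknown".
def Raises_get_instruction_argument_type (raw_part : String) : Prop := preB raw_part.toList = false
instance (raw_part : String) : Decidable (Raises_get_instruction_argument_type raw_part) := by
  unfold Raises_get_instruction_argument_type; infer_instance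
def pvRaiseWitness_get_instruction_argument_type : String := "[]"
def pvRaiseWitnessOut_get_instruction_argument_type : String := "unknown"

def Spec_get_instruction_argument_type (raw_part : String) (out : String) : Prop := out = get_instruction_argument_type_alt raw_part
instance (raw_part : String) (out : String) : Decidable (Spec_get_instruction_argument_type raw_part out) := by unfold Spec_get_instruction_argument_type; infer_instance

-- ===== CLAIM (what is proved, stated in full; the proofs are below) =====
def Claim_equal_get_instruction_argument_type : Prop := ∀ (raw_part : String), Dom_get_instruction_argument_type raw_part → Pre_get_instruction_argument_type raw_part → Spec_get_instruction_argument_type raw_part (get_instruction_argument_type raw_part)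

def Claim_raises_get_instruction_argument_type : Prop := (∀ (raw_part : String), Dom_get_instruction_argument_type raw_part → Raises_get_instruction_argument_type raw_part → ¬ Pre_get_instruction_argument_type raw_part) ∧ (Dom_get_instruction_argument_type (pvRaiseWitness_get_instruction_argument_type) ∧ Raises_get_instruction_argument_type (pvRaiseWitness_get_instruction_argument_type) ∧ get_instruction_argument_type_alt (pvRaiseWitness_get_instruction_argument_type) = pvRaiseWitnessOut_get_instruction_argument_type)

-- ===== LEMMAS AND PROOFS =====


theorem pv_sw_nil (x : Char) : PySem.Chars.startswith [] [x] = false := rfl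
theorem pv_sw_cons (a x : Char) (l : List Char) : PySem.Chars.startswith (a::l) [x] = (a == x) := by
  simp only [PySem.Chars.startswith, List.isPrefixOf, Bool.and_true]
  exact Bool.beq_comm
theorem pv_sw2_cons (a x y : Char) (l : List Char) :
    PySem.Chars.startswith (a::l) [x, y] = (a == x && PySem.Chars.startswith l [y]) := by
  simp only [PySem.Chars.startswith, List.isPrefixOf]
  rw [Bool.beq_comm]
theorem pv_sw_take (l : List Char) (x : Char) : PySem.Chars.startswith l [x] = true ↔ l.take 1 = [x] := by
  cases l with
  | nil => simp [pv_sw_nil]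
  | cons a l =>
    rw [pv_sw_cons]
    simp only [List.take_succ_cons, List.take_zero, beq_iff_eq, List.cons.injEq, and_true]
theorem pv_ew_last (l : List Char) (x : Char) : PySem.Chars.endswith l [x] = (l.getLast? == some x) := by
  induction l using List.reverseRecOn with
  | nil => rfl
  | append_singleton ys y ih =>
    simp only [PySem.Chars.endswith, List.isSuffixOf, List.reverse_append, List.reverse_cons,
      List.reverse_nil, List.nil_append, List.singleton_append, List.isPrefixOf, Bool.and_true]
    rw [List.getLast?_concat]
    rw [Bool.beq_comm]
    simp

theorem pvStart_cons (c : Char) (rest : List Char) :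
    pvStart (c :: rest) = if c = '-' then 1 else 0 := by
  simp [pvStart, PySem.List.pyGetD_zero_cons]

theorem pvTB_cons (c : Char) (rest : List Char) :
    pvTB (c :: rest) = if c = '-' then rest else c :: rest := by
  simp only [pvTB, pv_sw_cons, PySem.List.slice_from_one]
  by_cases h : c = '-' <;> simp [h]

theorem pv_getD1 (a b d : Char) (l : List Char) : PySem.List.pyGetD (a::b::l) 1 d = b := by
  rw [PySem.List.pyGetD_ofNat']
  simp [List.getD]

theorem pv_getD_neg_one (a : Char) (l : List Char) (d : Char) :
    PySem.List.pyGetD (a::l) (-1) d = (a::l).getLast (List.cons_ne_nil a l) := by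
  exact PySem.List.pyGetD_neg_one (a::l) d (List.cons_ne_nil a l)

theorem pv_sliceA0 (c : Char) (rest : List Char) :
    PySem.List.slice (c::rest) (some 0) (some 2) = c :: rest.take 1 := by
  rcases rest with _ | ⟨z, tt⟩ <;> simp [PySem.List.slice, PySem.List.clampIdx, List.take]

theorem pv_sliceA1 (c d : Char) (tt : List Char) :
    PySem.List.slice (c::d::tt) (some 1) (some 3) = d :: tt.take 1 := by
  rcases tt with _ | ⟨z, tt⟩ <;> simp [PySem.List.slice, PySem.List.clampIdx, List.take]

theorem pv_sliceI0 (c : Char) (rest : List Char) :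
    PySem.List.slice (c::rest) (some 1) (some (-1)) = rest.dropLast := by
  simp [PySem.List.slice, PySem.List.clampIdx, List.dropLast_eq_take]
  rw [if_neg (by omega)]
  omega

theorem pv_sliceI1 (c d : Char) (tt : List Char) :
    PySem.List.slice (c::d::tt) (some 2) (some (-1)) = tt.dropLast := by
  simp [PySem.List.slice, PySem.List.clampIdx, List.dropLast_eq_take]
  rw [if_neg (by omega)]
  rcases tt with _ | ⟨z, tt⟩
  · simp
  · simp

theorem preBF_irrel : ∀ (k n m : Nat) (cs : List Char), cs.length ≤ k → cs.length ≤ n → cs.length ≤ m →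
    preBF n cs = preBF m cs := by
  intro k
  induction k with
  | zero =>
    intro n m cs hk _ _
    have : cs = [] := List.length_eq_zero_iff.mp (Nat.le_zero.mp hk)
    subst this
    simp [preBF]
  | succ k ih =>
    intro n m cs hk hn hm
    match cs, hk, hn, hm with
    | [], _, _, _ => simp [preBF]
    | ['-'], _, _, _ => simp [preBF]
    | '-' :: th :: tt, hk, hn, hm =>
      match n, m, hn, hm with
      | n+1, m+1, hn, hm =>
        simp only [preBF]
        split
        · exact ih n m tt.dropLast (by simp at hk ⊢; omega) (by simp at hn ⊢; omega) (by simp at hm ⊢; omega)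
        · rfl
    | c :: rest, hk, hn, hm =>
      match n, m, hn, hm with
      | n+1, m+1, hn, hm =>
        by_cases hc : c = '-'
        · subst hc
          match rest, hk, hn, hm with
          | [], _, _, _ => simp [preBF]
          | th :: tt, hk, hn, hm =>
            simp only [preBF]
            split
            · exact ih n m tt.dropLast (by simp at hk ⊢; omega) (by simp at hn ⊢; omega) (by simp at hm ⊢; omega)
            · rfl
        · rw [preBF.eq_5 n c rest (by intros; exact absurd (by assumption) hc) (by intros; exact absurd (by assumption) hc), preBF.eq_5 m c rest (by intros; exact absurd (by assumption) hc) (by intros; exact absurd (by assumption) hc)]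
          split
          · exact ih n m rest.dropLast (by simp at hk ⊢; omega) (by simp at hn ⊢; omega) (by simp at hm ⊢; omega)
          · rfl

theorem preBF_fuel (n : Nat) (cs : List Char) (h : cs.length ≤ n) : preBF n cs = preB cs :=
  preBF_irrel (max n cs.length) n cs.length cs (le_max_right _ _) h (le_refl _)

-- stripping trailing whitespace keeps a non-whitespace head (and second char)
theorem pv_rstrip_keep1 (p : Char → Bool) (c : Char) (ws : List Char) (hc : p c = false) :
    ∃ rest, (List.dropWhile p (c :: ws).reverse).reverse = c :: rest := by
  rw [show (c :: ws).reverse = ws.reverse ++ [c] by simp, List.dropWhile_append]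
  split
  · exact ⟨[], by simp [List.dropWhile, hc]⟩
  · exact ⟨(List.dropWhile p ws.reverse).reverse, by simp⟩

theorem pv_rstrip_keep2 (p : Char → Bool) (c d : Char) (ws : List Char) (hd : p d = false) :
    ∃ rest, (List.dropWhile p (c :: d :: ws).reverse).reverse = c :: d :: rest := by
  rw [show (c :: d :: ws).reverse = ws.reverse ++ [d, c] by simp, List.dropWhile_append]
  split
  · exact ⟨[], by simp [List.dropWhile, hd]⟩
  · exact ⟨(List.dropWhile p ws.reverse).reverse, by simp⟩

-- int()/float() both fail on a string whose (sign-stripped) head is 'R'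
theorem pv_int_R (ws : List Char) : PySem.Int.ofChars? ('R' :: ws) = none := by
  obtain ⟨rest, hr⟩ := pv_rstrip_keep1 PySem.Int.isIntSpace 'R' ws (by decide)
  have hlead : List.dropWhile PySem.Int.isIntSpace ('R' :: ws) = 'R' :: ws := by rfl
  simp only [PySem.Int.ofChars?, hlead]
  rw [hr]
  rfl
theorem pv_int_negR (ws : List Char) : PySem.Int.ofChars? ('-' :: 'R' :: ws) = none := by
  obtain ⟨rest, hr⟩ := pv_rstrip_keep2 PySem.Int.isIntSpace '-' 'R' ws (by decide)
  have hlead : List.dropWhile PySem.Int.isIntSpace ('-' :: 'R' :: ws) = '-' :: 'R' :: ws := by rfl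
  simp only [PySem.Int.ofChars?, hlead]
  rw [hr]
  rfl
theorem pv_float_R (ws : List Char) : pyFloatOk ('R' :: ws) = false := by
  obtain ⟨rest, hr⟩ := pv_rstrip_keep1 PySem.Int.isIntSpace 'R' ws (by decide)
  have hlead : List.dropWhile PySem.Int.isIntSpace ('R' :: ws) = 'R' :: ws := by rfl
  simp only [pyFloatOk, hlead]
  rw [hr]
  rfl
theorem pv_float_negR (ws : List Char) : pyFloatOk ('-' :: 'R' :: ws) = false := by
  obtain ⟨rest, hr⟩ := pv_rstrip_keep2 PySem.Int.isIntSpace '-' 'R' ws (by decide)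
  have hlead : List.dropWhile PySem.Int.isIntSpace ('-' :: 'R' :: ws) = '-' :: 'R' :: ws := by rfl
  simp only [pyFloatOk, hlead]
  rw [hr]
  rfl

theorem pv_MAF_ne (g : List Char) : pvMAF ++ g ≠ pvUNK := by
  have h : pvMAF = 'm' :: "emory_address_from_".toList := rfl
  rw [h]
  simp [pvUNK]

theorem pv_AVF_ne (g : List Char) : pvAVF ++ g ≠ pvUNK := by
  have h : pvAVF = 'a' :: "bsolute_value_from_".toList := rfl
  rw [h]
  simp [pvUNK]

theorem getA_wrap1_signed (tt : List Char)
    (h2 : ('-'::'['::tt).getLast? = some ']') :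
    getA ('-'::'['::tt) = (if getA tt.dropLast ≠ pvUNK then pvMAF ++ getA tt.dropLast else pvUNK) := by
  have hlast : ('-'::'['::tt).getLast (List.cons_ne_nil _ _) = ']' := by
    have := List.getLast?_eq_getLast (l := '-'::'['::tt) (List.cons_ne_nil _ _)
    rw [this] at h2
    exact (Option.some_inj.mp h2)
  have hst : pvStart ('-'::'['::tt) = 1 := by rw [pvStart_cons]; simp
  have hdt : pvDT1 ('-'::'['::tt) = pvUNK := by
    rw [pvDT1, hst]
    simp only [Nat.cast_one]
    rw [pv_getD1, if_neg (by decide)]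
  rw [getA]
  rw [if_neg (by rw [PySem.List.pyGetD_zero_cons]; decide)]
  rw [hst]
  simp only [Nat.cast_one, show ((1:Int)+2 = 3) from by norm_num, show ((1:Int)+1 = 2) from by norm_num]
  rw [if_neg (by rw [pv_sliceA1]; simp), if_neg (by rw [pv_sliceA1]; simp),
      if_neg (by rw [pv_sliceA1]; simp)]
  rw [dif_pos ⟨by rw [pv_getD1], by rw [pv_getD_neg_one, hlast]⟩]
  rw [pv_sliceI1, hdt]

theorem pv_last_iff (c : Char) (l : List Char) (x : Char) :
    (c::l).getLast (List.cons_ne_nil c l) = x ↔ (c::l).getLast? = some x := by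
  rw [List.getLast?_eq_getLast (l := c::l) (List.cons_ne_nil _ _)]
  exact ⟨fun h => by rw [h], fun h => Option.some_inj.mp h⟩

theorem core_signed (d : Char) (tt : List Char)
    (hw1 : ¬ (d = '[' ∧ ('-'::d::tt).getLast? = some ']'))
    (hw2 : ¬ (d = '|' ∧ ('-'::d::tt).getLast? = some '|')) :
    getA ('-'::d::tt) = coreB ('-'::d::tt) := by
  have hst : pvStart ('-'::d::tt) = 1 := by rw [pvStart_cons]; simp
  have htb : pvTB ('-'::d::tt) = d::tt := by rw [pvTB_cons]; simp
  have hiff : (PySem.Chars.find ('-'::d::tt) ['+'] ≠ -1) ↔ (PySem.Chars.isIn ['+'] ('-'::d::tt) = true) := by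
    rw [PySem.Chars.find_ne_neg_one_iff, PySem.Chars.isIn_iff_infix]
  by_cases hR : d = 'R'
  · subst hR
    have e1 : getA ('-'::'R'::tt) =
        (if PySem.Chars.isIn ['+'] ('-'::'R'::tt) = true then pvRWI else pvREG) := by
      rw [getA]
      rw [if_neg (by rw [PySem.List.pyGetD_zero_cons]; decide)]
      rw [hst]
      simp only [Nat.cast_one, show ((1:Int)+2 = 3) from by norm_num]
      rw [if_neg (by rw [pv_sliceA1]; simp), if_neg (by rw [pv_sliceA1]; simp),
          if_neg (by rw [pv_sliceA1]; simp)]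
      rw [dif_neg (by rw [pv_getD1]; rintro ⟨h, -⟩; exact absurd h (by decide))]
      rw [dif_neg (by rw [pv_getD1]; rintro ⟨h, -⟩; exact absurd h (by decide))]
      rw [if_neg (by rw [pv_int_negR]; simp)]
      rw [if_neg (by rw [pv_float_negR]; simp)]
      rw [pvDT1, hst]
      simp only [Nat.cast_one]
      rw [pv_getD1, if_pos rfl]
      simp only [hiff]
    have e2 : coreB ('-'::'R'::tt) =
        (if PySem.Chars.isIn ['+'] ('-'::'R'::tt) = true then pvRWI else pvREG) := by
      rw [coreB, htb]
      rw [if_pos (by rw [pv_sw_cons]; rfl)]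
    rw [e1, e2]
  · have hdt : pvDT1 ('-'::d::tt) = pvUNK := by
      rw [pvDT1, hst]
      simp only [Nat.cast_one]
      rw [pv_getD1, if_neg hR]
    have e1 : getA ('-'::d::tt) =
        (if d = '0' ∧ tt.take 1 = ['x'] then pvIMMI
         else if d = 'c' ∧ tt.take 1 = ['['] then pvCMA
         else if d = 'a' ∧ tt.take 1 = ['['] then pvATTR
         else if (PySem.Int.ofChars? ('-'::d::tt)).isSome = true then pvIMMI
         else if pyFloatOk ('-'::d::tt) = true then pvIMMF
         else pvUNK) := by
      rw [getA]
      rw [if_neg (by rw [PySem.List.pyGetD_zero_cons]; decide)]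
      rw [hst]
      simp only [Nat.cast_one, show ((1:Int)+2 = 3) from by norm_num]
      rw [pv_sliceA1]
      rw [dif_neg (by rw [pv_getD1, pv_getD_neg_one]; rw [pv_last_iff]; exact hw1)]
      rw [dif_neg (by rw [pv_getD1, pv_getD_neg_one]; rw [pv_last_iff]; exact hw2)]
      rw [hdt]
      simp only [List.cons.injEq]
    have e2 : coreB ('-'::d::tt) =
        (if d = '0' ∧ tt.take 1 = ['x'] then pvIMMI
         else if d = 'c' ∧ tt.take 1 = ['['] then pvCMA
         else if d = 'a' ∧ tt.take 1 = ['['] then pvATTR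
         else if (PySem.Int.ofChars? ('-'::d::tt)).isSome = true then pvIMMI
         else if pyFloatOk ('-'::d::tt) = true then pvIMMF
         else pvUNK) := by
      rw [coreB, htb]
      rw [if_neg (by rw [pv_sw_cons]; simp [hR])]
      rw [if_neg (by rw [pv_sw_cons]; decide)]
      simp only [pv_sw2_cons, Bool.and_eq_true, beq_iff_eq, pv_sw_take]
    rw [e1, e2]

theorem getA_wrap2_signed (tt : List Char)
    (h2 : ('-'::'|'::tt).getLast? = some '|') :
    getA ('-'::'|'::tt) = (if getA tt.dropLast ≠ pvUNK then pvAVF ++ getA tt.dropLast else pvUNK) := by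
  have hlast : ('-'::'|'::tt).getLast (List.cons_ne_nil _ _) = '|' := (pv_last_iff _ _ _).mpr h2
  have hst : pvStart ('-'::'|'::tt) = 1 := by rw [pvStart_cons]; simp
  have hdt : pvDT1 ('-'::'|'::tt) = pvUNK := by
    rw [pvDT1, hst]
    simp only [Nat.cast_one]
    rw [pv_getD1, if_neg (by decide)]
  rw [getA]
  rw [if_neg (by rw [PySem.List.pyGetD_zero_cons]; decide)]
  rw [hst]
  simp only [Nat.cast_one, show ((1:Int)+2 = 3) from by norm_num, show ((1:Int)+1 = 2) from by norm_num]
  rw [if_neg (by rw [pv_sliceA1]; simp), if_neg (by rw [pv_sliceA1]; simp),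
      if_neg (by rw [pv_sliceA1]; simp)]
  rw [dif_neg (by rw [pv_getD1]; rintro ⟨h, -⟩; exact absurd h (by decide))]
  rw [dif_pos ⟨by rw [pv_getD1], by rw [pv_getD_neg_one, hlast]⟩]
  rw [pv_sliceI1, hdt]

theorem getA_wrap1_unsigned (rest : List Char)
    (h2 : ('['::rest).getLast? = some ']') :
    getA ('['::rest) = (if getA rest.dropLast ≠ pvUNK then pvMAF ++ getA rest.dropLast else pvUNK) := by
  have hlast : ('['::rest).getLast (List.cons_ne_nil _ _) = ']' := (pv_last_iff _ _ _).mpr h2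
  have hst : pvStart ('['::rest) = 0 := by rw [pvStart_cons]; simp
  have hdt : pvDT1 ('['::rest) = pvUNK := by
    rw [pvDT1, hst]
    simp only [Nat.cast_zero]
    rw [PySem.List.pyGetD_zero_cons, if_neg (by decide)]
  rw [getA]
  rw [if_neg (by rw [PySem.List.pyGetD_zero_cons]; decide)]
  rw [hst]
  simp only [Nat.cast_zero, show ((0:Int)+2 = 2) from by norm_num, show ((0:Int)+1 = 1) from by norm_num]
  rw [if_neg (by rw [pv_sliceA0]; simp), if_neg (by rw [pv_sliceA0]; simp),
      if_neg (by rw [pv_sliceA0]; simp)]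
  rw [dif_pos ⟨by rw [PySem.List.pyGetD_zero_cons], by rw [pv_getD_neg_one, hlast]⟩]
  rw [pv_sliceI0, hdt]

theorem getA_wrap2_unsigned (rest : List Char)
    (h2 : ('|'::rest).getLast? = some '|') :
    getA ('|'::rest) = (if getA rest.dropLast ≠ pvUNK then pvAVF ++ getA rest.dropLast else pvUNK) := by
  have hlast : ('|'::rest).getLast (List.cons_ne_nil _ _) = '|' := (pv_last_iff _ _ _).mpr h2
  have hst : pvStart ('|'::rest) = 0 := by rw [pvStart_cons]; simp
  have hdt : pvDT1 ('|'::rest) = pvUNK := by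
    rw [pvDT1, hst]
    simp only [Nat.cast_zero]
    rw [PySem.List.pyGetD_zero_cons, if_neg (by decide)]
  rw [getA]
  rw [if_neg (by rw [PySem.List.pyGetD_zero_cons]; decide)]
  rw [hst]
  simp only [Nat.cast_zero, show ((0:Int)+2 = 2) from by norm_num, show ((0:Int)+1 = 1) from by norm_num]
  rw [if_neg (by rw [pv_sliceA0]; simp), if_neg (by rw [pv_sliceA0]; simp),
      if_neg (by rw [pv_sliceA0]; simp)]
  rw [dif_neg (by rw [PySem.List.pyGetD_zero_cons]; rintro ⟨h, -⟩; exact absurd h (by decide))]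
  rw [dif_pos ⟨by rw [PySem.List.pyGetD_zero_cons], by rw [pv_getD_neg_one, hlast]⟩]
  rw [pv_sliceI0, hdt]

theorem loopB_wrap1_signed (tt acc : List Char) (h2 : ('-'::'['::tt).getLast? = some ']') :
    loopB ('-'::'['::tt) acc = loopB tt.dropLast (acc ++ pvMAF) := by
  have htb : pvTB ('-'::'['::tt) = '['::tt := by rw [pvTB_cons]; simp
  rw [loopB]
  rw [dif_pos ⟨by rw [htb, pv_sw_cons]; rfl, by rw [pv_ew_last, h2]; rfl⟩]
  rw [htb, pv_sliceI0]

theorem loopB_wrap2_signed (tt acc : List Char) (h2 : ('-'::'|'::tt).getLast? = some '|') :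
    loopB ('-'::'|'::tt) acc = loopB tt.dropLast (acc ++ pvAVF) := by
  have htb : pvTB ('-'::'|'::tt) = '|'::tt := by rw [pvTB_cons]; simp
  rw [loopB]
  rw [dif_neg (by rw [htb, pv_sw_cons]; rintro ⟨h, -⟩; exact absurd h (by decide))]
  rw [dif_pos ⟨by rw [htb, pv_sw_cons]; rfl, by rw [pv_ew_last, h2]; rfl⟩]
  rw [htb, pv_sliceI0]

theorem loopB_wrap1_unsigned (rest acc : List Char) (h2 : ('['::rest).getLast? = some ']') :
    loopB ('['::rest) acc = loopB rest.dropLast (acc ++ pvMAF) := by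
  have htb : pvTB ('['::rest) = '['::rest := by rw [pvTB_cons]; simp
  rw [loopB]
  rw [dif_pos ⟨by rw [htb, pv_sw_cons]; rfl, by rw [pv_ew_last, h2]; rfl⟩]
  rw [htb, pv_sliceI0]

theorem loopB_wrap2_unsigned (rest acc : List Char) (h2 : ('|'::rest).getLast? = some '|') :
    loopB ('|'::rest) acc = loopB rest.dropLast (acc ++ pvAVF) := by
  have htb : pvTB ('|'::rest) = '|'::rest := by rw [pvTB_cons]; simp
  rw [loopB]
  rw [dif_neg (by rw [htb, pv_sw_cons]; rintro ⟨h, -⟩; exact absurd h (by decide))]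
  rw [dif_pos ⟨by rw [htb, pv_sw_cons]; rfl, by rw [pv_ew_last, h2]; rfl⟩]
  rw [htb, pv_sliceI0]

theorem core_unsigned (c : Char) (rest : List Char) (hc : c ≠ '-')
    (hw1 : ¬ (c = '[' ∧ (c::rest).getLast? = some ']'))
    (hw2 : ¬ (c = '|' ∧ (c::rest).getLast? = some '|')) :
    getA (c::rest) = coreB (c::rest) := by
  have hst : pvStart (c::rest) = 0 := by rw [pvStart_cons]; simp [hc]
  have htb : pvTB (c::rest) = c::rest := by rw [pvTB_cons]; simp [hc]
  have hiff : (PySem.Chars.find (c::rest) ['+'] ≠ -1) ↔ (PySem.Chars.isIn ['+'] (c::rest) = true) := by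
    rw [PySem.Chars.find_ne_neg_one_iff, PySem.Chars.isIn_iff_infix]
  by_cases hR : c = 'R'
  · subst hR
    have e1 : getA ('R'::rest) =
        (if PySem.Chars.isIn ['+'] ('R'::rest) = true then pvRWI else pvREG) := by
      rw [getA]
      rw [if_neg (by rw [PySem.List.pyGetD_zero_cons]; decide)]
      rw [hst]
      simp only [Nat.cast_zero, show ((0:Int)+2 = 2) from by norm_num]
      rw [if_neg (by rw [pv_sliceA0]; simp), if_neg (by rw [pv_sliceA0]; simp),
          if_neg (by rw [pv_sliceA0]; simp)]
      rw [dif_neg (by rw [PySem.List.pyGetD_zero_cons]; rintro ⟨h, -⟩; exact absurd h (by decide))]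
      rw [dif_neg (by rw [PySem.List.pyGetD_zero_cons]; rintro ⟨h, -⟩; exact absurd h (by decide))]
      rw [if_neg (by rw [pv_int_R]; simp)]
      rw [if_neg (by rw [pv_float_R]; simp)]
      rw [pvDT1, hst]
      simp only [Nat.cast_zero]
      rw [PySem.List.pyGetD_zero_cons, if_pos rfl]
      simp only [hiff]
    have e2 : coreB ('R'::rest) =
        (if PySem.Chars.isIn ['+'] ('R'::rest) = true then pvRWI else pvREG) := by
      rw [coreB, htb]
      rw [if_pos (by rw [pv_sw_cons]; rfl)]
    rw [e1, e2]
  · by_cases hP : c = 'P'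
    · subst hP
      have e1 : getA ('P'::rest) = pvPRED := by
        rw [getA]
        rw [if_pos (by rw [PySem.List.pyGetD_zero_cons])]
      have e2 : coreB ('P'::rest) = pvPRED := by
        rw [coreB, htb]
        rw [if_neg (by rw [pv_sw_cons]; decide)]
        rw [if_pos (by rw [pv_sw_cons]; rfl)]
      rw [e1, e2]
    · have hdt : pvDT1 (c::rest) = pvUNK := by
        rw [pvDT1, hst]
        simp only [Nat.cast_zero]
        rw [PySem.List.pyGetD_zero_cons, if_neg hR]
      have e1 : getA (c::rest) =
          (if c = '0' ∧ rest.take 1 = ['x'] then pvIMMI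
           else if c = 'c' ∧ rest.take 1 = ['['] then pvCMA
           else if c = 'a' ∧ rest.take 1 = ['['] then pvATTR
           else if (PySem.Int.ofChars? (c::rest)).isSome = true then pvIMMI
           else if pyFloatOk (c::rest) = true then pvIMMF
           else pvUNK) := by
        rw [getA]
        rw [if_neg (by rw [PySem.List.pyGetD_zero_cons]; exact hP)]
        rw [hst]
        simp only [Nat.cast_zero, show ((0:Int)+2 = 2) from by norm_num]
        rw [pv_sliceA0]
        rw [dif_neg (by rw [PySem.List.pyGetD_zero_cons, pv_getD_neg_one]; rw [pv_last_iff]; exact hw1)]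
        rw [dif_neg (by rw [PySem.List.pyGetD_zero_cons, pv_getD_neg_one]; rw [pv_last_iff]; exact hw2)]
        rw [hdt]
        simp only [List.cons.injEq]
      have e2 : coreB (c::rest) =
          (if c = '0' ∧ rest.take 1 = ['x'] then pvIMMI
           else if c = 'c' ∧ rest.take 1 = ['['] then pvCMA
           else if c = 'a' ∧ rest.take 1 = ['['] then pvATTR
           else if (PySem.Int.ofChars? (c::rest)).isSome = true then pvIMMI
           else if pyFloatOk (c::rest) = true then pvIMMF
           else pvUNK) := by
        rw [coreB, htb]
        rw [if_neg (by rw [pv_sw_cons]; simp [hR])]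
        rw [if_neg (by rw [pv_sw_cons]; simp [hP])]
        simp only [pv_sw2_cons, Bool.and_eq_true, beq_iff_eq, pv_sw_take]
      rw [e1, e2]

theorem preB_step_signed (th : Char) (tt : List Char)
    (h : (th = '[' ∧ ('-'::th::tt).getLast? = some ']') ∨ (th = '|' ∧ ('-'::th::tt).getLast? = some '|'))
    (hpre : preB ('-'::th::tt) = true) : preB tt.dropLast = true := by
  have hcond : ((th = '[' && ('-'::th::tt).getLast? == some ']')
      || (th = '|' && ('-'::th::tt).getLast? == some '|')) = true := by
    rcases h with ⟨h1, h2⟩ | ⟨h1, h2⟩ <;> (subst h1; simp [h2])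
  rw [preB] at hpre
  simp only [List.length_cons] at hpre
  simp only [preBF] at hpre
  rw [if_pos hcond] at hpre
  rw [← preBF_fuel (tt.length + 1) tt.dropLast (by simp; omega)]
  exact hpre

theorem preB_step_unsigned (c : Char) (rest : List Char) (hc : c ≠ '-')
    (h : (c = '[' ∧ (c::rest).getLast? = some ']') ∨ (c = '|' ∧ (c::rest).getLast? = some '|'))
    (hpre : preB (c::rest) = true) : preB rest.dropLast = true := by
  have hcond : ((c = '[' && (c::rest).getLast? == some ']')
      || (c = '|' && (c::rest).getLast? == some '|')) = true := by
    rcases h with ⟨h1, h2⟩ | ⟨h1, h2⟩ <;> (subst h1; simp [h2])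
  rw [preB] at hpre
  simp only [List.length_cons] at hpre
  rw [preBF.eq_5 rest.length c rest (by intros; exact absurd (by assumption) hc)
      (by intros; exact absurd (by assumption) hc)] at hpre
  rw [if_pos hcond] at hpre
  rw [← preBF_fuel rest.length rest.dropLast (by simp)]
  exact hpre

-- the loop invariant: loopB accumulates exactly what A's recursion prepends
theorem pv_loop_eq (n : Nat) : ∀ cs : List Char, cs.length ≤ n → preB cs = true →
    ∀ acc : List Char, loopB cs acc = (if getA cs = pvUNK then pvUNK else acc ++ getA cs) := by
  induction n with
  | zero =>
    intro cs hlen hpre acc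
    have : cs = [] := List.length_eq_zero_iff.mp (Nat.le_zero.mp hlen)
    subst this
    simp [preB, preBF] at hpre
  | succ n ih =>
    intro cs hlen hpre acc
    rcases cs with _ | ⟨c, rest⟩
    · simp [preB, preBF] at hpre
    · by_cases hc : c = '-'
      · subst hc
        rcases rest with _ | ⟨d, tt⟩
        · simp [preB, preBF] at hpre
        · by_cases hw1 : d = '[' ∧ ('-'::d::tt).getLast? = some ']'
          · obtain ⟨hd, hl⟩ := hw1
            subst hd
            have hlen' : tt.dropLast.length ≤ n := by
              simp at hlen ⊢
              omega
            have hpre' : preB tt.dropLast = true :=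
              preB_step_signed '[' tt (Or.inl ⟨rfl, hl⟩) hpre
            rw [loopB_wrap1_signed tt acc hl, getA_wrap1_signed tt hl,
                ih tt.dropLast hlen' hpre' (acc ++ pvMAF)]
            by_cases hg : getA tt.dropLast = pvUNK
            · simp [hg]
            · simp [hg, pv_MAF_ne, List.append_assoc]
          · by_cases hw2 : d = '|' ∧ ('-'::d::tt).getLast? = some '|'
            · obtain ⟨hd, hl⟩ := hw2
              subst hd
              have hlen' : tt.dropLast.length ≤ n := by
                simp at hlen ⊢
                omega
              have hpre' : preB tt.dropLast = true :=
                preB_step_signed '|' tt (Or.inr ⟨rfl, hl⟩) hpre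
              rw [loopB_wrap2_signed tt acc hl, getA_wrap2_signed tt hl,
                  ih tt.dropLast hlen' hpre' (acc ++ pvAVF)]
              by_cases hg : getA tt.dropLast = pvUNK
              · simp [hg]
              · simp [hg, pv_AVF_ne, List.append_assoc]
            · have htb : pvTB ('-'::d::tt) = d::tt := by rw [pvTB_cons]; simp
              rw [loopB]
              rw [dif_neg (by
                rw [htb, pv_sw_cons, pv_ew_last]
                rintro ⟨ha, hb⟩
                exact hw1 ⟨by simpa using ha, by simpa using hb⟩)]
              rw [dif_neg (by
                rw [htb, pv_sw_cons, pv_ew_last]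
                rintro ⟨ha, hb⟩
                exact hw2 ⟨by simpa using ha, by simpa using hb⟩)]
              rw [core_signed d tt hw1 hw2]
      · rcases rest with _ | ⟨d, tt⟩
        · -- single char c ≠ '-': no wrapper possible? c could be '[' with getLast? = some '[' ≠ ']'
          by_cases hw1 : c = '[' ∧ ([c] : List Char).getLast? = some ']'
          · obtain ⟨hd, hl⟩ := hw1
            subst hd
            simp at hl
          · by_cases hw2 : c = '|' ∧ ([c] : List Char).getLast? = some '|'
            · obtain ⟨hd, hl⟩ := hw2
              subst hd
              have hpre' : preB ([] : List Char).dropLast = true :=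
                preB_step_unsigned '|' [] hc (Or.inr ⟨rfl, by simp⟩) hpre
              simp [preB, preBF] at hpre'
            · have htb : pvTB [c] = [c] := by rw [pvTB_cons]; simp [hc]
              rw [loopB]
              rw [dif_neg (by
                rw [htb, pv_sw_cons, pv_ew_last]
                rintro ⟨ha, hb⟩
                exact hw1 ⟨by simpa using ha, by simpa using hb⟩)]
              rw [dif_neg (by
                rw [htb, pv_sw_cons, pv_ew_last]
                rintro ⟨ha, hb⟩
                exact hw2 ⟨by simpa using ha, by simpa using hb⟩)]
              rw [core_unsigned c [] hc hw1 hw2]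
        · by_cases hw1 : c = '[' ∧ (c::d::tt).getLast? = some ']'
          · obtain ⟨hd, hl⟩ := hw1
            subst hd
            have hlen' : (d::tt).dropLast.length ≤ n := by
              simp at hlen ⊢
              omega
            have hpre' : preB (d::tt).dropLast = true :=
              preB_step_unsigned '[' (d::tt) hc (Or.inl ⟨rfl, hl⟩) hpre
            rw [loopB_wrap1_unsigned (d::tt) acc hl, getA_wrap1_unsigned (d::tt) hl,
                ih (d::tt).dropLast hlen' hpre' (acc ++ pvMAF)]
            by_cases hg : getA (d::tt).dropLast = pvUNK
            · simp [hg]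
            · simp [hg, pv_MAF_ne, List.append_assoc]
          · by_cases hw2 : c = '|' ∧ (c::d::tt).getLast? = some '|'
            · obtain ⟨hd, hl⟩ := hw2
              subst hd
              have hlen' : (d::tt).dropLast.length ≤ n := by
                simp at hlen ⊢
                omega
              have hpre' : preB (d::tt).dropLast = true :=
                preB_step_unsigned '|' (d::tt) hc (Or.inr ⟨rfl, hl⟩) hpre
              rw [loopB_wrap2_unsigned (d::tt) acc hl, getA_wrap2_unsigned (d::tt) hl,
                  ih (d::tt).dropLast hlen' hpre' (acc ++ pvAVF)]
              by_cases hg : getA (d::tt).dropLast = pvUNK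
              · simp [hg]
              · simp [hg, pv_AVF_ne, List.append_assoc]
            · have htb : pvTB (c::d::tt) = c::d::tt := by rw [pvTB_cons]; simp [hc]
              rw [loopB]
              rw [dif_neg (by
                rw [htb, pv_sw_cons, pv_ew_last]
                rintro ⟨ha, hb⟩
                exact hw1 ⟨by simpa using ha, by simpa using hb⟩)]
              rw [dif_neg (by
                rw [htb, pv_sw_cons, pv_ew_last]
                rintro ⟨ha, hb⟩
                exact hw2 ⟨by simpa using ha, by simpa using hb⟩)]
              rw [core_unsigned c (d::tt) hc hw1 hw2]

-- ===== VERDICT (by name: the statement is the Claim_ definition above) =====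
theorem get_instruction_argument_type_spec : Claim_equal_get_instruction_argument_type := by
  intro s _ hp
  unfold Spec_get_instruction_argument_type get_instruction_argument_type get_instruction_argument_type_alt
  have h := pv_loop_eq s.toList.length s.toList (le_refl _) hp []
  rw [h]
  split <;> simp_all

@[simp] theorem get_instruction_argument_type_raises : Claim_raises_get_instruction_argument_type := by
  unfold Claim_raises_get_instruction_argument_type
  constructor
  · intro s _ hr hp
    unfold Raises_get_instruction_argument_type at hr
    unfold Pre_get_instruction_argument_type at hp
    rw [hp] at hr; simp at hr
  · refine ⟨by decide, by decide, ?_⟩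
    show String.ofList (loopB "[]".toList []) = "unknown"
    have h1 : loopB "[]".toList [] = loopB [] ([] ++ pvMAF) := by
      rw [loopB]; rfl
    have hc : coreB [] = pvUNK := by decide
    have h2 : loopB [] ([] ++ pvMAF) = pvUNK := by
      rw [loopB]
      simp [pvTB, PySem.Chars.startswith, List.isPrefixOf, hc]
    rw [h1, h2]; rfl
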